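-- pv_equiv track=rewrite | github.com/starhaz3-ship-it/star-polymarket | backtest_streak_polydata.py | compute_running_streaks
-- ===== SOURCE A (Python) =====
-- def compute_running_streaks(outcomes):
--     """For each position i (starting from 1), compute:
--     - The current streak length ending at position i-1
--     - The direction of that streak
--     - The actual outcome at position i (the "next" candle)
--
--     This lets us test: "after seeing N in a row, what happens next?"
--     """
--     if len(outcomes) < 2:
--         return []
--
--     results = []
--     for i in range(1, len(outcomes)):
--         # Look backwards from i-1 to count streak
--         streak_dir = outcomes[i - 1]
--         streak_len = 1
--         j = i - 2
--         while j >= 0 and outcomes[j] == streak_dir: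
--             streak_len += 1
--             j -= 1
--
--         results.append({
--             'streak_dir': streak_dir,
--             'streak_len': streak_len,
--             'next_outcome': outcomes[i],
--             'position': i,
--         })
--
--     return results
-- ===== SOURCE B (Python) =====
-- def compute_running_streaks(outcomes):
--     """Single pass: maintain the running streak length incrementally."""
--     results = []
--     run = 0
--     prev = None
--     pos = 0
--     for cur in outcomes:
--         if prev is not None:
--             results.append({
--                 'streak_dir': prev,
--                 'streak_len': run,
--                 'next_outcome': cur,
--                 'position': pos,
--             })
--         run = run + 1 if cur == prev else 1
--         prev = cur
--         pos += 1
--     return results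
-- ===== Notes on version B (the rewrite author's own statement) =====
-- stated objective: faster
-- what changed: Replaced the backward rescanning inner while-loop with a single forward pass that maintains the running streak length incrementally.
import Mathlib
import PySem

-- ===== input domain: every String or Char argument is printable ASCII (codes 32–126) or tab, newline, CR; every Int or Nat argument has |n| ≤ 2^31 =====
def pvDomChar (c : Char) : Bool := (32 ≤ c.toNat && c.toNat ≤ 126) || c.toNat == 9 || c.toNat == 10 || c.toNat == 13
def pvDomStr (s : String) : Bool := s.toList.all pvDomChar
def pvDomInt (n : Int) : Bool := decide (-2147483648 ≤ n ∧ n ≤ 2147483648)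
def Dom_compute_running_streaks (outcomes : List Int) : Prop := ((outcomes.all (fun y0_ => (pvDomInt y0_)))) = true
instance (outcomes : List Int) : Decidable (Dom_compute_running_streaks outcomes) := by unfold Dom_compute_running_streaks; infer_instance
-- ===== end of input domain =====

-- B replaces A's per-position backward rescan by one forward pass with an incremental streak counter.

-- ===== PORT A =====
-- the inner 'while j >= 0 and outcomes[j] == streak_dir' loop; fuel ≥ number of
-- iterations is supplied by the caller, so the fuel-0 branch is never reached.
-- indices are always in range here, so pyGetD is exact.
def aStreak (outcomes : List Int) (d : Int) : Nat → Int → Int → Int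
  | 0, _, len => len
  | fuel + 1, j, len =>
    if 0 ≤ j ∧ PySem.List.pyGetD outcomes j 0 = d then
      aStreak outcomes d fuel (j - 1) (len + 1)
    else len

-- the body of 'for i in range(1, len(outcomes))'
def aBody (outcomes : List Int) (results : List (List (String × Int))) (i : Int) :
    List (List (String × Int)) :=
  let d := PySem.List.pyGetD outcomes (i - 1) 0
  let len := aStreak outcomes d (i.toNat + 1) (i - 2) 1
  results ++ [[("streak_dir", d), ("streak_len", len),
               ("next_outcome", PySem.List.pyGetD outcomes i 0), ("position", i)]]

def compute_running_streaks (outcomes : List Int) : List (List (String × Int)) :=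
  if outcomes.length < 2 then [] else
  (PySem.List.pyRange 1 (outcomes.length : Int) 1).foldl (aBody outcomes) []

-- ===== PORT B =====
-- state = (results, run, prev, pos), one fold step per element of outcomes
def bStep (st : List (List (String × Int)) × Int × Option Int × Int) (cur : Int) :
    List (List (String × Int)) × Int × Option Int × Int :=
  let (results, run, prev, pos) := st
  let results' := match prev with
    | none => results
    | some p => results ++ [[("streak_dir", p), ("streak_len", run),
                             ("next_outcome", cur), ("position", pos)]]
  (results', if some cur = prev then run + 1 else 1, some cur, pos + 1)

def compute_running_streaks_alt (outcomes : List Int) : List (List (String × Int)) :=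
  (outcomes.foldl bStep ([], 0, none, 0)).1

-- ===== PRECONDITION & SPEC =====
def Spec_compute_running_streaks (outcomes : List Int) (out : List (List (String × Int))) : Prop := out = compute_running_streaks_alt outcomes
instance (outcomes : List Int) (out : List (List (String × Int))) : Decidable (Spec_compute_running_streaks outcomes out) := by unfold Spec_compute_running_streaks; infer_instance

-- ===== CLAIM (what is proved, stated in full; the proofs are below) =====
def Claim_equal_compute_running_streaks : Prop := ∀ (outcomes : List Int), Dom_compute_running_streaks outcomes → Spec_compute_running_streaks outcomes (compute_running_streaks outcomes)

-- ===== LEMMAS AND PROOFS =====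

-- length of the leading run of equal elements
def lead : List Int → Int
  | [] => 0
  | a :: r => 1 + ((r.takeWhile (fun b => b == a)).length : Int)

-- length of the trailing run of equal elements
def trail (xs : List Int) : Int := lead xs.reverse

-- the row appended for position n = xs.length when x follows xs
def row (xs : List Int) (x : Int) (h : xs ≠ []) : List (String × Int) :=
  [("streak_dir", xs.getLast h), ("streak_len", trail xs),
   ("next_outcome", x), ("position", (xs.length : Int))]

theorem aStreak_congr (xs : List Int) (x d : Int) :
    ∀ (fuel : Nat) (j len : Int), j < (xs.length : Int) →
    aStreak (xs ++ [x]) d fuel j len = aStreak xs d fuel j len := by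
  intro fuel
  induction fuel with
  | zero => intro j len _; rfl
  | succ fuel ih =>
    intro j len hj
    simp only [aStreak]
    by_cases h0 : 0 ≤ j
    · have hg : PySem.List.pyGetD (xs ++ [x]) j 0 = PySem.List.pyGetD xs j 0 := by
        rw [PySem.List.pyGetD_eq_getElem (xs ++ [x]) 0 h0 (by simp; omega),
            PySem.List.pyGetD_eq_getElem xs 0 h0 (by exact_mod_cast hj)]
        exact List.getElem_append_left (by omega)
      rw [hg]
      split_ifs with hc
      · exact ih (j - 1) (len + 1) (by omega)
      · rfl
    · rw [if_neg (by omega), if_neg (by omega)]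

theorem aStreak_eq (ys : List Int) (d : Int) :
    ∀ (k : Nat) (fuel : Nat) (len : Int), k ≤ ys.length → k < fuel →
    aStreak ys d fuel ((k : Int) - 1) len
      = len + (((ys.take k).reverse.takeWhile (fun b => b == d)).length : Int) := by
  intro k
  induction k with
  | zero =>
    intro fuel len _ hf
    obtain ⟨f, rfl⟩ : ∃ f, fuel = f + 1 := ⟨fuel - 1, by omega⟩
    simp [aStreak]
  | succ k ih =>
    intro fuel len hk hf
    obtain ⟨f, rfl⟩ : ∃ f, fuel = f + 1 := ⟨fuel - 1, by omega⟩
    have hkl : k < ys.length := by omega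
    have htake : ys.take (k + 1) = ys.take k ++ [ys[k]] := by
      rw [List.take_add_one]; simp [List.getElem?_eq_getElem hkl]
    have hget : PySem.List.pyGetD ys ((k : Int) + 1 - 1) 0 = ys[k] := by
      rw [show ((k : Int) + 1 - 1) = (k : Int) by ring,
          PySem.List.pyGetD_eq_getElem ys 0 (by positivity) (by exact_mod_cast hkl)]
      simp
    have hrev : (ys.take k ++ [ys[k]]).reverse = ys[k] :: (ys.take k).reverse := by simp
    simp only [aStreak, Nat.cast_add, Nat.cast_one, hget]
    by_cases hd : ys[k] = d
    · rw [if_pos ⟨by omega, hd⟩, show ((k : Int) + 1 - 1 - 1) = (k : Int) - 1 by ring,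
          ih f (len + 1) (by omega) (by omega), htake, hrev, List.takeWhile_cons,
          if_pos (by simp [hd])]
      simp only [List.length_cons]; push_cast; ring
    · rw [if_neg (by simp [hd]), htake, hrev, List.takeWhile_cons, if_neg (by simp [hd])]
      simp

theorem aBody_def (outcomes : List Int) (results : List (List (String × Int))) (i : Int) :
    aBody outcomes results i
      = results ++ [[("streak_dir", PySem.List.pyGetD outcomes (i - 1) 0),
          ("streak_len", aStreak outcomes (PySem.List.pyGetD outcomes (i - 1) 0) (i.toNat + 1) (i - 2) 1),
          ("next_outcome", PySem.List.pyGetD outcomes i 0), ("position", i)]] := rfl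

theorem trail_eq (xs : List Int) (h : xs ≠ []) :
    trail xs = 1 + (((xs.dropLast).reverse.takeWhile (fun b => b == xs.getLast h)).length : Int) := by
  rcases List.eq_nil_or_concat xs with rfl | ⟨ys, a, rfl⟩
  · exact absurd rfl h
  · simp only [List.concat_eq_append, trail, List.reverse_append, List.reverse_cons,
      List.reverse_nil, List.nil_append, List.cons_append, lead, List.dropLast_concat,
      List.getLast_concat]

theorem aBody_congr (xs : List Int) (x : Int) (acc : List (List (String × Int))) :
    ∀ i ∈ PySem.List.pyRange 1 (xs.length : Int) 1,
    aBody (xs ++ [x]) acc i = aBody xs acc i := by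
  intro i hi
  obtain ⟨h1, h2⟩ := (PySem.List.mem_pyRange_one).mp hi
  have e1 : PySem.List.pyGetD (xs ++ [x]) (i - 1) 0 = PySem.List.pyGetD xs (i - 1) 0 := by
    rw [PySem.List.pyGetD_eq_getElem (xs ++ [x]) 0 (by omega)
          (by simp only [List.length_append, List.length_cons, List.length_nil]; push_cast; omega),
        PySem.List.pyGetD_eq_getElem xs 0 (by omega) (by omega)]
    exact List.getElem_append_left (by omega)
  have e2 : PySem.List.pyGetD (xs ++ [x]) i 0 = PySem.List.pyGetD xs i 0 := by
    rw [PySem.List.pyGetD_eq_getElem (xs ++ [x]) 0 (by omega)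
          (by simp only [List.length_append, List.length_cons, List.length_nil]; push_cast; omega),
        PySem.List.pyGetD_eq_getElem xs 0 (by omega) (by omega)]
    exact List.getElem_append_left (by omega)
  rw [aBody_def, aBody_def, e1, e2, aStreak_congr xs x _ _ _ _ (by omega)]

theorem aBody_last (xs : List Int) (x : Int) (h : xs ≠ [])
    (acc : List (List (String × Int))) :
    aBody (xs ++ [x]) acc (xs.length : Int) = acc ++ [row xs x h] := by
  have hn : 0 < xs.length := List.length_pos_iff.mpr h
  have ht : (((xs.length : Int)) - 1).toNat = xs.length - 1 := by omega
  have e1 : PySem.List.pyGetD (xs ++ [x]) ((xs.length : Int) - 1) 0 = xs.getLast h := by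
    rw [PySem.List.pyGetD_eq_getElem (xs ++ [x]) 0 (by omega)
          (by simp only [List.length_append, List.length_cons, List.length_nil]; push_cast; omega)]
    simp only [ht]
    rw [List.getElem_append_left (by omega), List.getLast_eq_getElem]
  have e2 : PySem.List.pyGetD (xs ++ [x]) (xs.length : Int) 0 = x := by
    rw [PySem.List.pyGetD_eq_getElem (xs ++ [x]) 0 (by omega) (by simp)]
    have ht2 : ((xs.length : Int)).toNat = xs.length := by omega
    simp only [ht2]
    exact List.getElem_concat_length rfl _
  have e3 : aStreak (xs ++ [x]) (xs.getLast h) (((xs.length : Int)).toNat + 1)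
      ((xs.length : Int) - 2) 1 = trail xs := by
    have hk : (((xs.length - 1 : Nat)) : Int) - 1 = (xs.length : Int) - 2 := by omega
    rw [← hk, aStreak_eq (xs ++ [x]) _ (xs.length - 1) _ 1 (by simp; omega) (by omega),
        List.take_append_of_le_length (by omega), ← List.dropLast_eq_take, ← trail_eq xs h]
  rw [aBody_def, e1, e2, e3, row]

theorem A_snoc (xs : List Int) (x : Int) (h : xs ≠ []) :
    compute_running_streaks (xs ++ [x]) = compute_running_streaks xs ++ [row xs x h] := by
  have hn : 0 < xs.length := List.length_pos_iff.mpr h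
  have hlen : ((xs ++ [x]).length : Int) = (xs.length : Int) + 1 := by simp
  unfold compute_running_streaks
  rw [if_neg (by simp; omega), hlen,
      PySem.List.pyRange_one_succ_right (by exact_mod_cast hn), List.foldl_append,
      PySem.List.foldl_congr_mem _ (aBody (xs ++ [x])) (aBody xs) [] (aBody_congr xs x),
      List.foldl_cons, List.foldl_nil, aBody_last xs x h]
  split_ifs with h2
  · rw [PySem.List.pyRange_one_eq_nil (by omega)]; rfl
  · rfl

theorem trail_snoc (xs : List Int) (x : Int) (h : xs ≠ []) :
    trail (xs ++ [x]) = if x = xs.getLast h then trail xs + 1 else 1 := by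
  rcases List.eq_nil_or_concat xs with rfl | ⟨ys, a, rfl⟩
  · exact absurd rfl h
  · simp only [List.concat_eq_append, trail, List.reverse_append, List.reverse_cons,
      List.reverse_nil, List.nil_append, List.cons_append, lead, List.takeWhile_cons,
      List.getLast_concat]
    by_cases hx : x = a
    · subst hx
      simp only [BEq.rfl]
      push_cast [List.length_cons]; ring
    · rw [if_neg (by simp [Ne.symm hx]), if_neg hx]
      simp

theorem B_state (xs : List Int) (h : xs ≠ []) :
    xs.foldl bStep ([], 0, none, 0)
      = (compute_running_streaks xs, trail xs, some (xs.getLast h), (xs.length : Int)) := by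
  induction xs using List.reverseRecOn with
  | nil => exact absurd rfl h
  | append_singleton ys y ih =>
    rw [List.foldl_append, List.foldl_cons, List.foldl_nil]
    rcases eq_or_ne ys [] with rfl | hy
    · simp [bStep, compute_running_streaks, trail, lead]
    · rw [ih hy, A_snoc ys y hy, trail_snoc ys y hy]
      simp [bStep, row]

-- ===== VERDICT (by name: the statement is the Claim_ definition above) =====
theorem compute_running_streaks_spec : Claim_equal_compute_running_streaks := by
  intro xs _
  unfold Spec_compute_running_streaks compute_running_streaks_alt
  rcases eq_or_ne xs [] with rfl | h
  · decide
  · rw [B_state xs h]
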